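-- pv_equiv track=rewrite | github.com/lucassantos61/GeradorCPF | geraCpf.py | geraMascara
-- ===== SOURCE A (Python) =====
-- def geraMascara(cpf):
-- 	x = 0
-- 	cpfaux = ''
-- 	while x < len(cpf):
-- 		cpfaux = cpfaux+cpf[x]
-- 		if x == 2 or x == 5:
-- 			cpfaux +='.'
-- 		elif x == 8:
-- 			cpfaux += '-'
--
-- 		x +=1
-- 	return cpfaux
-- ===== SOURCE B (Python) =====
-- def geraMascara(cpf):
--     out = cpf[:3]
--     if len(cpf) >= 3:
--         out += '.'
--     out += cpf[3:6]
--     if len(cpf) >= 6: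
--         out += '.'
--     out += cpf[6:9]
--     if len(cpf) >= 9:
--         out += '-'
--     out += cpf[9:]
--     return out
-- ===== Notes on version B (the rewrite author's own statement) =====
-- stated objective: faster
-- what changed: Replaces the per-character while loop with quadratic repeated string concatenation by a closed-form concatenation of three fixed slices plus guarded separators.
import Mathlib
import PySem

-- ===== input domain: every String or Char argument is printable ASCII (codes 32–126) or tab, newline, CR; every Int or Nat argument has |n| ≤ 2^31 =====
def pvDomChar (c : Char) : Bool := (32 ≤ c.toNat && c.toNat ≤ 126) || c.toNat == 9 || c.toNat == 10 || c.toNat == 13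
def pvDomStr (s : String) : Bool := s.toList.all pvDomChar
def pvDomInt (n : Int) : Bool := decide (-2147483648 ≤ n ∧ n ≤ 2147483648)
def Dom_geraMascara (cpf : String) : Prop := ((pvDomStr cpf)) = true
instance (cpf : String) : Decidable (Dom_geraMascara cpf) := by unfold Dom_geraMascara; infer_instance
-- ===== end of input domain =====

-- B replaces A's per-character loop with fixed slices and guarded separators (simpler decomposition).

-- ===== PORT A =====
-- A's while loop: x is the index, acc the string built so far, rest the characters not yet consumed.
def geraMascaraAux (x : Nat) (acc : List Char) : List Char → List Char
  | [] => acc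
  | c :: rest =>
      geraMascaraAux (x + 1)
        (acc ++ [c] ++ (if x == 2 || x == 5 then ['.'] else if x == 8 then ['-'] else [])) rest

def geraMascara (cpf : String) : String :=
  String.ofList (geraMascaraAux 0 [] cpf.toList)

-- ===== PORT B =====
def geraMascara_alt (cpf : String) : String :=
  let l := cpf.toList
  let n := l.length
  String.ofList
    (PySem.List.slice l none (some 3)
      ++ (if 3 ≤ n then ['.'] else [])
      ++ PySem.List.slice l (some 3) (some 6)
      ++ (if 6 ≤ n then ['.'] else [])
      ++ PySem.List.slice l (some 6) (some 9)
      ++ (if 9 ≤ n then ['-'] else [])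
      ++ PySem.List.slice l (some 9) none)

-- ===== PRECONDITION & SPEC =====
def Spec_geraMascara (cpf : String) (out : String) : Prop := out = geraMascara_alt cpf
instance (cpf : String) (out : String) : Decidable (Spec_geraMascara cpf out) := by unfold Spec_geraMascara; infer_instance

-- ===== CLAIM (what is proved, stated in full; the proofs are below) =====
def Claim_equal_geraMascara : Prop := ∀ (cpf : String), Dom_geraMascara cpf → Spec_geraMascara cpf (geraMascara cpf)

-- ===== LEMMAS AND PROOFS =====

-- Once the index has passed 8, the loop just copies the remaining characters.
theorem geraMascaraAux_ge9 (rest : List Char) : ∀ (x : Nat) (acc : List Char), 9 ≤ x →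
    geraMascaraAux x acc rest = acc ++ rest := by
  induction rest with
  | nil => intro x acc _; simp [geraMascaraAux]
  | cons c rest ih =>
      intro x acc hx
      have hx2 : x ≠ 2 := by omega
      have hx5 : x ≠ 5 := by omega
      have hx8 : x ≠ 8 := by omega
      simp [geraMascaraAux, hx2, hx5, hx8, ih (x + 1) _ (by omega)]

theorem geraMascara_lists (l : List Char) :
    geraMascaraAux 0 [] l =
      PySem.List.slice l none (some 3)
        ++ (if 3 ≤ l.length then ['.'] else [])
        ++ PySem.List.slice l (some 3) (some 6)
        ++ (if 6 ≤ l.length then ['.'] else [])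
        ++ PySem.List.slice l (some 6) (some 9)
        ++ (if 9 ≤ l.length then ['-'] else [])
        ++ PySem.List.slice l (some 9) none := by
  rcases l with _ | ⟨a, l⟩; · simp [geraMascaraAux, PySem.List.slice, PySem.List.clampIdx]
  rcases l with _ | ⟨b, l⟩; · simp [geraMascaraAux, PySem.List.slice, PySem.List.clampIdx]
  rcases l with _ | ⟨c, l⟩; · simp [geraMascaraAux, PySem.List.slice, PySem.List.clampIdx]
  rcases l with _ | ⟨d, l⟩; · simp [geraMascaraAux, PySem.List.slice, PySem.List.clampIdx]
  rcases l with _ | ⟨e, l⟩; · simp [geraMascaraAux, PySem.List.slice, PySem.List.clampIdx]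
  rcases l with _ | ⟨f, l⟩; · simp [geraMascaraAux, PySem.List.slice, PySem.List.clampIdx]
  rcases l with _ | ⟨g, l⟩; · simp [geraMascaraAux, PySem.List.slice, PySem.List.clampIdx]
  rcases l with _ | ⟨h, l⟩; · simp [geraMascaraAux, PySem.List.slice, PySem.List.clampIdx]
  rcases l with _ | ⟨i, l⟩; · simp [geraMascaraAux, PySem.List.slice, PySem.List.clampIdx]
  simp [geraMascaraAux, PySem.List.slice, PySem.List.clampIdx,
    geraMascaraAux_ge9 l 9 _ (by omega)]

-- ===== VERDICT (by name: the statement is the Claim_ definition above) =====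
theorem geraMascara_spec : Claim_equal_geraMascara := by
  intro cpf _
  unfold Spec_geraMascara geraMascara geraMascara_alt
  rw [geraMascara_lists]
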